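-- pv_equiv track=rewrite | github.com/kevin00000000/geeksforgeeks-oj | easy/star_elements.py | _star_super_star
-- ===== SOURCE A (Python) =====
-- def _star_super_star(array, length):
--     left_max = 0
--     right_max = 0
--     left_max_array = [0 for _ in range(length)]
--     right_max_array = [0 for _ in range(length)]
--     for index in range(1, length):
--         if array[index-1] > left_max:
--             left_max = array[index-1]
--         left_max_array[index] = left_max
--     for index in range(length-2, -1, -1):
--         if array[index+1] > right_max:
--             right_max = array[index+1]
--         right_max_array[index] = right_max
--     super_star = -1
--     star = []
--     for index, value in enumerate(array):
--         if value > left_max_array[index] and value > right_max_array[index]: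
--             super_star = value
--             star.append(value)
--         elif value > right_max_array[index]:
--             star.append(value)
--         else:
--             pass
--     return super_star, star
-- ===== SOURCE B (Python) =====
-- def _star_super_star(array, length):
--     # one right-to-left scan marks the stars with a single running right_max;
--     # the leftmost star is the super star iff it occurs exactly once
--     is_star = [False] * length
--     right_max = 0
--     for index in range(length - 1, -1, -1):
--         if array[index] > right_max:
--             right_max = array[index]
--             is_star[index] = True
--     star = [value for index, value in enumerate(array) if is_star[index]]
--     if star and array.count(star[0]) == 1:
--         return star[0], star
--     return -1, star
-- ===== Notes on version B (the rewrite author's own statement) =====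
-- stated objective: simpler
-- what changed: Replaces A's three passes with two auxiliary prefix/suffix-max int arrays by one right-to-left scan with a single running right_max that marks star positions, and derives super_star as the leftmost star when it occurs exactly once.
-- outside the precondition, e.g. on _star_super_star([], 1): A returns (-1, []), B raises IndexError
import Mathlib
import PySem

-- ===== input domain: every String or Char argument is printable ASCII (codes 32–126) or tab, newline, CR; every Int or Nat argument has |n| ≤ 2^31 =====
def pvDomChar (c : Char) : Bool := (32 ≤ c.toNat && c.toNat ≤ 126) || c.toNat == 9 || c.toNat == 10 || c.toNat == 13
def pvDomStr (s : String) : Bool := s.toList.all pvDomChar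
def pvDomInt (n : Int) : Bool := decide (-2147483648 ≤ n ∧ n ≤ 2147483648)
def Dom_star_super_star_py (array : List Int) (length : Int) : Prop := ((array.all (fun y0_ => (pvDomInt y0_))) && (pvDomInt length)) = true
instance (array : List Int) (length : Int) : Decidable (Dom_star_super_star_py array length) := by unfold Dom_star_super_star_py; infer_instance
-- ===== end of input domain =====

-- B replaces A's three passes (prefix-max array, suffix-max array, final pass) by one
-- right-to-left scan with a single running right_max; objective: simpler.

-- ===== PORT A =====
-- literal transliteration of A; list indexing/assignment uses pyGetD/pySetD with default,
-- exact wherever the Python indexing is in range (guaranteed by Pre_ below)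
def star_super_star_py (array : List Int) (length : Int) : Int × List Int :=
  let left_max_array : List Int := (PySem.List.pyRange 0 length 1).map (fun _ => (0 : Int))
  let right_max_array : List Int := (PySem.List.pyRange 0 length 1).map (fun _ => (0 : Int))
  let s1 := (PySem.List.pyRange 1 length 1).foldl
    (fun (st : Int × List Int) index =>
      let left_max := if PySem.List.pyGetD array (index - 1) 0 > st.1 then PySem.List.pyGetD array (index - 1) 0 else st.1
      (left_max, PySem.List.pySetD st.2 index left_max)) (0, left_max_array)
  let s2 := (PySem.List.pyRange (length - 2) (-1) (-1)).foldl
    (fun (st : Int × List Int) index =>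
      let right_max := if PySem.List.pyGetD array (index + 1) 0 > st.1 then PySem.List.pyGetD array (index + 1) 0 else st.1
      (right_max, PySem.List.pySetD st.2 index right_max)) (0, right_max_array)
  let s3 := (PySem.List.enumerate array).foldl
    (fun (st : Int × List Int) iv =>
      if iv.2 > PySem.List.pyGetD s1.2 iv.1 0 ∧ iv.2 > PySem.List.pyGetD s2.2 iv.1 0 then
        (iv.2, st.2 ++ [iv.2])
      else if iv.2 > PySem.List.pyGetD s2.2 iv.1 0 then
        (st.1, st.2 ++ [iv.2])
      else st) (-1, [])
  s3

-- ===== PORT B =====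
-- the comprehension's is_star[index] is pyGetD with default false (in range under Pre_)
def star_super_star_py_alt (array : List Int) (length : Int) : Int × List Int :=
  let s := (PySem.List.pyRange (length - 1) (-1) (-1)).foldl
    (fun (st : Int × List Bool) index =>
      if PySem.List.pyGetD array index 0 > st.1 then
        (PySem.List.pyGetD array index 0, PySem.List.pySetD st.2 index true)
      else st)
    (0, PySem.List.pyRepeat [false] length)
  let star := ((PySem.List.enumerate array).filter
      (fun iv => PySem.List.pyGetD s.2 iv.1 false)).map (fun iv => iv.2)
  match star with
  | [] => (-1, star)
  | s0 :: _ => if array.count s0 = 1 then (s0, star) else (-1, star)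

-- ===== PRECONDITION & SPEC =====
-- Pre_ excludes the inputs where A raises IndexError (any length ≠ len(array) except the
-- empty-array corners) and the single corner array = [] with length = 1, where A's loops are
-- all skipped and it returns (-1, []) while B, which indexes array[length - 1], raises there.
def Pre_star_super_star_py (array : List Int) (length : Int) : Prop :=
  length = (array.length : Int) ∨ (array = [] ∧ length ≤ 0)
instance (array : List Int) (length : Int) : Decidable (Pre_star_super_star_py array length) := by
  unfold Pre_star_super_star_py; infer_instance

def pvWitness_star_super_star_py : List Int × Int := ([3, 1, 2], 3)

def Spec_star_super_star_py (array : List Int) (length : Int) (out : Int × List Int) : Prop :=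
  out = star_super_star_py_alt array length
instance (array : List Int) (length : Int) (out : Int × List Int) : Decidable (Spec_star_super_star_py array length out) := by
  unfold Spec_star_super_star_py; infer_instance

-- ===== CLAIM (what is proved, stated in full; the proofs are below) =====
def Claim_equal_star_super_star_py : Prop := ∀ (array : List Int) (length : Int), Dom_star_super_star_py array length → Pre_star_super_star_py array length → Spec_star_super_star_py array length (star_super_star_py array length)

-- ===== LEMMAS AND PROOFS =====

-- max of a list and 0 (the running maxima A and B maintain, both start at 0)
def m0 (l : List Int) : Int := l.foldr max 0

theorem m0_nil : m0 [] = 0 := rfl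
theorem m0_cons (v : Int) (l : List Int) : m0 (v :: l) = max v (m0 l) := rfl

theorem m0_nonneg (l : List Int) : 0 ≤ m0 l := by
  induction l with
  | nil => simp [m0_nil]
  | cons v l ih => rw [m0_cons]; omega

theorem m0_append_singleton (l : List Int) (x : Int) : m0 (l ++ [x]) = max (m0 l) x := by
  induction l with
  | nil => simp [m0]; omega
  | cons v l ih => simp only [List.cons_append, m0_cons, ih]; omega

theorem mem_le_m0 {x : Int} {l : List Int} (h : x ∈ l) : x ≤ m0 l := by
  induction l with
  | nil => simp at h
  | cons v l ih =>
    rw [m0_cons]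
    rcases List.mem_cons.mp h with h | h
    · omega
    · have := ih h; omega

theorem m0_zero_or_mem (l : List Int) : m0 l = 0 ∨ m0 l ∈ l := by
  induction l with
  | nil => left; rfl
  | cons v l ih =>
    rw [m0_cons]
    rcases le_total v (m0 l) with h | h
    · rw [max_eq_right h]
      rcases ih with h0 | hm
      · left; exact h0
      · right; exact List.mem_cons_of_mem _ hm
    · rw [max_eq_left h]; right; exact List.mem_cons_self

theorem count_eq_zero_of_gt {v : Int} {l : List Int} (h : m0 l < v) : l.count v = 0 :=
  List.count_eq_zero.mpr (fun hm => absurd (mem_le_m0 hm) (by omega))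

-- the star elements: those strictly greater than every later element (and than 0)
def starOf : List Int → List Int
  | [] => []
  | v :: rest => if m0 rest < v then v :: starOf rest else starOf rest

theorem starOf_shape (l : List Int) :
    (m0 l = 0 ∧ starOf l = []) ∨ (0 < m0 l ∧ ∃ t, starOf l = m0 l :: t) := by
  induction l with
  | nil => left; exact ⟨rfl, rfl⟩
  | cons v l ih =>
    rw [m0_cons]
    by_cases h : m0 l < v
    · right
      have h0 := m0_nonneg l
      have hm : max v (m0 l) = v := by omega
      rw [hm]
      exact ⟨by omega, starOf l, by simp [starOf, h]⟩
    · have hm : max v (m0 l) = m0 l := by omega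
      rw [hm]
      rcases ih with ⟨h0, he⟩ | ⟨h0, t, ht⟩
      · left; exact ⟨h0, by simp [starOf, he]; omega⟩
      · right; exact ⟨h0, t, by simp [starOf, ht]; omega⟩

-- A's final loop, written as one structural recursion carrying the running prefix max
def aLoop : List Int → Int → Int → List Int → Int × List Int
  | [], _, sup, star => (sup, star)
  | v :: rest, lm, sup, star =>
    if lm < v ∧ m0 rest < v then aLoop rest (max lm v) v (star ++ [v])
    else if m0 rest < v then aLoop rest (max lm v) sup (star ++ [v])
    else aLoop rest (max lm v) sup star

theorem aLoop_star (l : List Int) : ∀ (lm sup : Int) (star : List Int),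
    (aLoop l lm sup star).2 = star ++ starOf l := by
  induction l with
  | nil => intro lm sup star; simp [aLoop, starOf]
  | cons v rest ih =>
    intro lm sup star
    simp only [aLoop, starOf]
    by_cases hs : m0 rest < v
    · by_cases hlm : lm < v
      · rw [if_pos ⟨hlm, hs⟩, ih, if_pos hs]; simp
      · rw [if_neg (by tauto), if_pos hs, ih, if_pos hs]; simp
    · rw [if_neg (by tauto), if_neg hs, ih, if_neg hs]

theorem aLoop_sup (l : List Int) : ∀ (lm sup : Int) (star : List Int), 0 ≤ lm →
    (aLoop l lm sup star).1 = if lm < m0 l ∧ l.count (m0 l) = 1 then m0 l else sup := by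
  induction l with
  | nil => intro lm sup star _; simp [aLoop, m0_nil]
  | cons v rest ih =>
    intro lm sup star hlm
    have hrn := m0_nonneg rest
    simp only [aLoop, m0_cons]
    by_cases hs : m0 rest < v
    · have hmax : max v (m0 rest) = v := by omega
      have hc0 : rest.count v = 0 := count_eq_zero_of_gt hs
      have hcc : (v :: rest).count v = rest.count v + 1 := List.count_cons_self
      by_cases hl : lm < v
      · rw [if_pos ⟨hl, hs⟩, ih _ _ _ (by omega), hmax]
        have hn1 : ¬(max lm v < m0 rest ∧ rest.count (m0 rest) = 1) := by intro hx; omega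
        have hp2 : lm < v ∧ (v :: rest).count v = 1 := ⟨hl, by omega⟩
        rw [if_neg hn1, if_pos hp2]
      · have hn0 : ¬(lm < v ∧ m0 rest < v) := by intro hx; omega
        rw [if_neg hn0, if_pos hs, ih _ _ _ (by omega), hmax]
        have hn1 : ¬(max lm v < m0 rest ∧ rest.count (m0 rest) = 1) := by intro hx; omega
        have hn2 : ¬(lm < v ∧ (v :: rest).count v = 1) := by intro hx; omega
        rw [if_neg hn1, if_neg hn2]
    · have hmax : max v (m0 rest) = m0 rest := by omega
      have hn0 : ¬(lm < v ∧ m0 rest < v) := by intro hx; omega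
      rw [if_neg hn0, if_neg hs, ih _ _ _ (by omega), hmax]
      by_cases heq : v = m0 rest
      · rcases m0_zero_or_mem rest with h0 | hmem
        · have hn1 : ¬(max lm v < m0 rest ∧ rest.count (m0 rest) = 1) := by intro hx; omega
          have hn2 : ¬(lm < m0 rest ∧ (v :: rest).count (m0 rest) = 1) := by intro hx; omega
          rw [if_neg hn1, if_neg hn2]
        · have hge : 1 ≤ rest.count (m0 rest) := List.one_le_count_iff.mpr hmem
          have hb' : (v :: rest).count (m0 rest) = rest.count (m0 rest) + 1 := by
            rw [← heq]; exact List.count_cons_self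
          have hn1 : ¬(max lm v < m0 rest ∧ rest.count (m0 rest) = 1) := by intro hx; omega
          have hn2 : ¬(lm < m0 rest ∧ (v :: rest).count (m0 rest) = 1) := by intro hx; omega
          rw [if_neg hn1, if_neg hn2]
      · have hlt : v < m0 rest := by omega
        have hcnt : (v :: rest).count (m0 rest) = rest.count (m0 rest) :=
          List.count_cons_of_ne (by omega)
        rw [hcnt]
        by_cases hc : rest.count (m0 rest) = 1
        · by_cases h2 : lm < m0 rest
          · rw [if_pos ⟨(by omega : max lm v < m0 rest), hc⟩, if_pos ⟨h2, hc⟩]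
          · have hn1 : ¬(max lm v < m0 rest ∧ rest.count (m0 rest) = 1) := by intro hx; omega
            have hn2 : ¬(lm < m0 rest ∧ rest.count (m0 rest) = 1) := by intro hx; omega
            rw [if_neg hn1, if_neg hn2]
        · have hn1 : ¬(max lm v < m0 rest ∧ rest.count (m0 rest) = 1) := fun hx => hc hx.2
          have hn2 : ¬(lm < m0 rest ∧ rest.count (m0 rest) = 1) := fun hx => hc hx.2
          rw [if_neg hn1, if_neg hn2]

-- closed form of A's first loop: positions s, s+1, …, s+c-1 receive the prefix maxima
def updL (array : List Int) : Nat → Nat → List Int → List Int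
  | 0, _, arr => arr
  | c + 1, s, arr => updL array c (s + 1) (PySem.List.pySetD arr (s : Int) (m0 (array.take s)))

theorem fold1_rec (array : List Int) : ∀ (c s : Nat) (arr : List Int), 1 ≤ s →
    s + c ≤ array.length →
    (PySem.List.pyRange (s : Int) ((s : Int) + (c : Int)) 1).foldl
      (fun (st : Int × List Int) index =>
        let left_max := if PySem.List.pyGetD array (index - 1) 0 > st.1 then PySem.List.pyGetD array (index - 1) 0 else st.1
        (left_max, PySem.List.pySetD st.2 index left_max)) (m0 (array.take (s - 1)), arr)
    = (m0 (array.take (s - 1 + c)), updL array c s arr) := by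
  intro c
  induction c with
  | zero =>
    intro s arr hs hlen
    rw [show ((s : Int) + ((0 : Nat) : Int)) = (s : Int) from by omega]
    rw [PySem.List.pyRange_one_eq_nil le_rfl]
    simp [updL]
  | succ c ih =>
    intro s arr hs hlen
    rw [PySem.List.pyRange_one_cons (by omega), List.foldl_cons]
    have hslt : s - 1 < array.length := by omega
    have hval : (if PySem.List.pyGetD array ((s : Int) - 1) 0 > m0 (array.take (s - 1)) then PySem.List.pyGetD array ((s : Int) - 1) 0 else m0 (array.take (s - 1))) = m0 (array.take s) := by
      rw [show ((s : Int) - 1) = ((s - 1 : Nat) : Int) from by omega, PySem.List.pyGetD_natCast]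
      have hgd : array.getD (s - 1) 0 = array[s - 1] := List.getD_eq_getElem array 0 hslt
      have htake : array.take s = array.take (s - 1) ++ [array[s - 1]] := by
        conv_lhs => rw [show s = s - 1 + 1 from by omega]
        rw [List.take_add_one, List.getElem?_eq_getElem hslt]
        rfl
      rw [htake, m0_append_singleton, hgd]
      split_ifs <;> omega
    dsimp only
    rw [hval]
    rw [show ((s : Int) + 1) = ((s + 1 : Nat) : Int) from by omega,
        show ((s : Int) + ((c + 1 : Nat) : Int)) = (((s + 1 : Nat) : Int) + (c : Int)) from by omega]
    have := ih (s + 1) (PySem.List.pySetD arr (s : Int) (m0 (array.take s))) (by omega) (by omega)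
    rw [show s + 1 - 1 = s from by omega] at this
    rw [this, show s - 1 + (c + 1) = s + c from by omega]
    simp [updL]

theorem updL_getD (array : List Int) : ∀ (c s : Nat) (arr : List Int) (i : Nat),
    i < arr.length → s + c ≤ arr.length →
    PySem.List.pyGetD (updL array c s arr) (i : Int) 0 =
      if s ≤ i ∧ i < s + c then m0 (array.take i) else PySem.List.pyGetD arr (i : Int) 0 := by
  intro c
  induction c with
  | zero =>
    intro s arr i hi hlen
    simp only [updL]
    rw [if_neg (by omega)]
  | succ c ih =>
    intro s arr i hi hlen
    simp only [updL]
    rw [ih (s + 1) _ i (by rw [PySem.List.length_pySetD]; omega) (by rw [PySem.List.length_pySetD]; omega)]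
    rw [PySem.List.pyGetD_pySetD_natCast arr s i (m0 (List.take s array)) 0 (by omega)]
    by_cases his : i = s
    · rw [if_neg (by omega : ¬(s + 1 ≤ i ∧ i < s + 1 + c)), if_pos his,
          if_pos (by omega : s ≤ i ∧ i < s + (c + 1)), his]
    · rw [if_neg his]
      by_cases hin : s + 1 ≤ i ∧ i < s + 1 + c
      · rw [if_pos hin, if_pos (by omega : s ≤ i ∧ i < s + (c + 1))]
      · rw [if_neg hin, if_neg (by omega : ¬(s ≤ i ∧ i < s + (c + 1)))]

-- closed form of A's second loop: positions t-1, …, 0 receive the suffix maxima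
def updR (array : List Int) : Nat → List Int → List Int
  | 0, arr => arr
  | t + 1, arr => updR array t (PySem.List.pySetD arr (t : Int) (m0 (array.drop (t + 1))))

theorem fold2_rec (array : List Int) : ∀ (t : Nat) (arr : List Int), t < array.length →
    (PySem.List.pyRange ((t : Int) - 1) (-1) (-1)).foldl
      (fun (st : Int × List Int) index =>
        let right_max := if PySem.List.pyGetD array (index + 1) 0 > st.1 then PySem.List.pyGetD array (index + 1) 0 else st.1
        (right_max, PySem.List.pySetD st.2 index right_max)) (m0 (array.drop (t + 1)), arr)
    = (m0 (array.drop 1), updR array t arr) := by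
  intro t
  induction t with
  | zero =>
    intro arr hlen
    rw [show (((0 : Nat) : Int) - 1) = (-1 : Int) from by omega]
    rw [PySem.List.pyRange_neg_one_eq_nil le_rfl]
    simp [updR]
  | succ t ih =>
    intro arr hlen
    rw [show (((t + 1 : Nat) : Int) - 1) = (t : Int) from by omega]
    rw [PySem.List.pyRange_neg_one_cons (by omega), List.foldl_cons]
    have htl : t + 1 < array.length := hlen
    have hval : (if PySem.List.pyGetD array ((t : Int) + 1) 0 > m0 (array.drop (t + 1 + 1)) then PySem.List.pyGetD array ((t : Int) + 1) 0 else m0 (array.drop (t + 1 + 1))) = m0 (array.drop (t + 1)) := by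
      rw [show ((t : Int) + 1) = ((t + 1 : Nat) : Int) from by omega, PySem.List.pyGetD_natCast]
      have hgd : array.getD (t + 1) 0 = array[t + 1] := List.getD_eq_getElem array 0 htl
      have hdrop : array.drop (t + 1) = array[t + 1] :: array.drop (t + 1 + 1) :=
        List.drop_eq_getElem_cons htl
      rw [hdrop, m0_cons, hgd]
      split_ifs <;> omega
    dsimp only
    rw [hval, ih _ (by omega)]
    rfl

theorem updR_getD (array : List Int) : ∀ (t : Nat) (arr : List Int) (i : Nat),
    i < arr.length → t ≤ arr.length →
    PySem.List.pyGetD (updR array t arr) (i : Int) 0 =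
      if i < t then m0 (array.drop (i + 1)) else PySem.List.pyGetD arr (i : Int) 0 := by
  intro t
  induction t with
  | zero =>
    intro arr i hi hlen
    simp only [updR]
    rw [if_neg (by omega)]
  | succ t ih =>
    intro arr i hi hlen
    simp only [updR]
    rw [ih _ i (by rw [PySem.List.length_pySetD]; omega) (by rw [PySem.List.length_pySetD]; omega)]
    rw [PySem.List.pyGetD_pySetD_natCast arr t i (m0 (List.drop (t + 1) array)) 0 (by omega)]
    by_cases his : i = t
    · rw [if_neg (by omega : ¬(i < t)), if_pos his, if_pos (by omega : i < t + 1), his]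
    · rw [if_neg his]
      by_cases hin : i < t
      · rw [if_pos hin, if_pos (by omega : i < t + 1)]
      · rw [if_neg hin, if_neg (by omega : ¬(i < t + 1))]

-- A's third loop equals aLoop, given the two lookup tables hold their closed forms
theorem fold3_gen (array lmaF rmaF : List Int)
    (hl : ∀ i : Nat, i < array.length → PySem.List.pyGetD lmaF (i : Int) 0 = m0 (array.take i))
    (hr : ∀ i : Nat, i < array.length → PySem.List.pyGetD rmaF (i : Int) 0 = m0 (array.drop (i + 1))) :
    ∀ (suf pre : List Int) (st0 sup : Int) (star : List Int),
    st0 = (pre.length : Int) → array = pre ++ suf →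
    (PySem.List.enumerate suf st0).foldl
      (fun (st : Int × List Int) iv =>
        if iv.2 > PySem.List.pyGetD lmaF iv.1 0 ∧ iv.2 > PySem.List.pyGetD rmaF iv.1 0 then
          (iv.2, st.2 ++ [iv.2])
        else if iv.2 > PySem.List.pyGetD rmaF iv.1 0 then
          (st.1, st.2 ++ [iv.2])
        else st) (sup, star)
    = aLoop suf (m0 pre) sup star := by
  intro suf
  induction suf with
  | nil =>
    intro pre st0 sup star hst harr
    simp [PySem.List.enumerate_nil, aLoop]
  | cons v rest ih =>
    intro pre st0 sup star hst harr
    rw [PySem.List.enumerate_cons, List.foldl_cons]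
    have hplen : pre.length < array.length := by
      rw [harr]; simp
    have hltake : PySem.List.pyGetD lmaF st0 0 = m0 pre := by
      rw [hst, hl pre.length hplen, harr, List.take_left]
    have hrdrop : PySem.List.pyGetD rmaF st0 0 = m0 rest := by
      rw [hst, hr pre.length hplen, harr]
      rw [show pre ++ v :: rest = (pre ++ [v]) ++ rest from by simp]
      rw [show pre.length + 1 = (pre ++ [v]).length from by simp]
      rw [List.drop_left]
    have hnext : (st0 + 1) = ((pre ++ [v]).length : Int) := by
      rw [hst]; simp
    have harr' : array = (pre ++ [v]) ++ rest := by simp [harr]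
    dsimp only at ih ⊢
    rw [hltake, hrdrop]
    simp only [aLoop]
    by_cases hs : m0 rest < v
    · by_cases hlm : m0 pre < v
      · have hp : m0 pre < v ∧ m0 rest < v := ⟨hlm, hs⟩
        rw [if_pos hp, ih (pre ++ [v]) (st0 + 1) v (star ++ [v]) hnext harr', m0_append_singleton,
            if_pos hp]
      · have hn : ¬(m0 pre < v ∧ m0 rest < v) := fun hx => hlm hx.1
        rw [if_neg hn, if_pos hs, ih (pre ++ [v]) (st0 + 1) sup (star ++ [v]) hnext harr',
            m0_append_singleton, if_neg hn, if_pos hs]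
    · have hn : ¬(m0 pre < v ∧ m0 rest < v) := fun hx => hs hx.2
      rw [if_neg hn, if_neg hs, ih (pre ++ [v]) (st0 + 1) sup star hnext harr',
          m0_append_singleton, if_neg hn, if_neg hs]

-- B's right-to-left scan: positions t-1, …, 0 of the flag list are set exactly at the stars
def updS (array : List Int) : Nat → List Bool → List Bool
  | 0, f => f
  | t + 1, f => updS array t
      (if m0 (array.drop (t + 1)) < PySem.List.pyGetD array (t : Int) 0
       then PySem.List.pySetD f (t : Int) true else f)

theorem foldS_rec (array : List Int) : ∀ (t : Nat) (f : List Bool), t ≤ array.length →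
    (PySem.List.pyRange ((t : Int) - 1) (-1) (-1)).foldl
      (fun (st : Int × List Bool) index =>
        if PySem.List.pyGetD array index 0 > st.1 then
          (PySem.List.pyGetD array index 0, PySem.List.pySetD st.2 index true)
        else st)
      (m0 (array.drop t), f)
    = (m0 array, updS array t f) := by
  intro t
  induction t with
  | zero =>
    intro f hlen
    rw [show (((0 : Nat) : Int) - 1) = (-1 : Int) from by omega]
    rw [PySem.List.pyRange_neg_one_eq_nil le_rfl]
    simp [updS]
  | succ t ih =>
    intro f hlen
    rw [show (((t + 1 : Nat) : Int) - 1) = (t : Int) from by omega]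
    rw [PySem.List.pyRange_neg_one_cons (by omega), List.foldl_cons]
    have htl : t < array.length := by omega
    have hdrop : array.drop t = PySem.List.pyGetD array (t : Int) 0 :: array.drop (t + 1) := by
      rw [PySem.List.pyGetD_natCast, List.getD_eq_getElem array 0 htl]
      exact List.drop_eq_getElem_cons htl
    dsimp only
    by_cases hc : m0 (array.drop (t + 1)) < PySem.List.pyGetD array (t : Int) 0
    · rw [if_pos hc]
      have hval : PySem.List.pyGetD array (t : Int) 0 = m0 (array.drop t) := by
        rw [hdrop, m0_cons]; omega
      rw [hval, ih _ (by omega)]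
      rw [show updS array (t + 1) f
            = updS array t (PySem.List.pySetD f (t : Int) true) from by
              simp only [updS]; rw [if_pos hc]]
    · rw [if_neg hc]
      have hval : m0 (array.drop (t + 1)) = m0 (array.drop t) := by
        rw [hdrop, m0_cons]; omega
      rw [hval, ih _ (by omega)]
      rw [show updS array (t + 1) f = updS array t f from by
            simp only [updS]; rw [if_neg hc]]

theorem foldS_gen (array : List Int) (t : Nat) (a rm0 : Int) (f : List Bool)
    (ha : a = (t : Int) - 1) (hrm0 : rm0 = m0 (array.drop t)) (hlen : t ≤ array.length) :
    (PySem.List.pyRange a (-1) (-1)).foldl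
      (fun (st : Int × List Bool) index =>
        if PySem.List.pyGetD array index 0 > st.1 then
          (PySem.List.pyGetD array index 0, PySem.List.pySetD st.2 index true)
        else st)
      (rm0, f)
    = (m0 array, updS array t f) := by
  subst ha hrm0
  exact foldS_rec array t f hlen

theorem updS_getD (array : List Int) : ∀ (t : Nat) (f : List Bool) (i : Nat),
    i < f.length → t ≤ f.length →
    PySem.List.pyGetD (updS array t f) (i : Int) false =
      if i < t ∧ m0 (array.drop (i + 1)) < PySem.List.pyGetD array (i : Int) 0 then true
      else PySem.List.pyGetD f (i : Int) false := by
  intro t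
  induction t with
  | zero =>
    intro f i hi hlen
    simp only [updS]
    rw [if_neg (fun hx => absurd hx.1 (by omega))]
  | succ t ih =>
    intro f i hi hlen
    by_cases hc : m0 (array.drop (t + 1)) < PySem.List.pyGetD array (t : Int) 0
    · rw [show updS array (t + 1) f
            = updS array t (PySem.List.pySetD f (t : Int) true) from by
              simp only [updS]; rw [if_pos hc]]
      rw [ih _ i (by rw [PySem.List.length_pySetD]; omega) (by rw [PySem.List.length_pySetD]; omega)]
      rw [PySem.List.pyGetD_pySetD_natCast f t i true false (by omega)]
      by_cases his : i = t
      · rw [if_neg (fun hx => absurd hx.1 (by omega)), if_pos his,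
            if_pos ⟨by omega, by rw [his]; exact hc⟩]
      · rw [if_neg his]
        by_cases hin : i < t ∧ m0 (array.drop (i + 1)) < PySem.List.pyGetD array (i : Int) 0
        · rw [if_pos hin, if_pos ⟨by omega, hin.2⟩]
        · rw [if_neg hin, if_neg (fun hx => by
            have hio : i < t ∨ i = t := by omega
            rcases hio with h | h
            · exact hin ⟨h, hx.2⟩
            · exact his h)]
    · rw [show updS array (t + 1) f = updS array t f from by
            simp only [updS]; rw [if_neg hc]]
      rw [ih f i (by omega) (by omega)]
      by_cases hin : i < t ∧ m0 (array.drop (i + 1)) < PySem.List.pyGetD array (i : Int) 0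
      · rw [if_pos hin, if_pos ⟨by omega, hin.2⟩]
      · rw [if_neg hin, if_neg (fun hx => by
          have hio : i < t ∨ i = t := by omega
          rcases hio with h | h
          · exact hin ⟨h, hx.2⟩
          · exact hc (h ▸ hx.2))]

theorem getD_replicate_false : ∀ (n i : Nat), List.getD (List.replicate n false) i false = false := by
  intro n i
  rcases lt_or_ge i n with h | h
  · simp [List.getD_eq_getElem?_getD, h]
  · simp [List.getD_eq_getElem?_getD,
      List.getElem?_eq_none (by simp; omega : (List.replicate n false).length ≤ i)]

-- filtering the enumerated array through the star flags yields exactly the star elements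
theorem filterS (array : List Int) (flags : List Bool)
    (hf : ∀ i : Nat, i < array.length →
        PySem.List.pyGetD flags (i : Int) false =
          if m0 (array.drop (i + 1)) < PySem.List.pyGetD array (i : Int) 0 then true else false) :
    ∀ (suf pre : List Int) (st0 : Int), st0 = (pre.length : Int) → array = pre ++ suf →
    ((PySem.List.enumerate suf st0).filter (fun iv => PySem.List.pyGetD flags iv.1 false)).map
        (fun iv => iv.2)
      = starOf suf := by
  intro suf
  induction suf with
  | nil =>
    intro pre st0 hst harr
    simp [PySem.List.enumerate_nil, starOf]
  | cons v rest ih =>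
    intro pre st0 hst harr
    have hplen : pre.length < array.length := by
      rw [harr]; simp
    have hv : PySem.List.pyGetD array ((pre.length : Nat) : Int) 0 = v := by
      rw [PySem.List.pyGetD_natCast, harr, List.getD_eq_getElem _ 0 (by simp)]
      rw [List.getElem_append_right (le_refl pre.length)]
      simp
    have hdropEq : array.drop (pre.length + 1) = rest := by
      rw [harr, show pre ++ v :: rest = (pre ++ [v]) ++ rest from by simp,
          show pre.length + 1 = (pre ++ [v]).length from by simp, List.drop_left]
    have hcnd : PySem.List.pyGetD flags st0 false = if m0 rest < v then true else false := by
      rw [hst, hf pre.length hplen, hdropEq, hv]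
    have hnext : st0 + 1 = ((pre ++ [v]).length : Int) := by rw [hst]; simp
    have harr' : array = (pre ++ [v]) ++ rest := by simp [harr]
    rw [PySem.List.enumerate_cons, List.filter_cons]
    dsimp only
    rw [hcnd]
    by_cases hb : m0 rest < v
    · rw [if_pos (by simp [hb]), List.map_cons, ih (pre ++ [v]) (st0 + 1) hnext harr']
      simp [starOf, hb]
    · rw [if_neg (by simp [hb]), ih (pre ++ [v]) (st0 + 1) hnext harr']
      simp [starOf, hb]

theorem fold1_gen (array : List Int) (c s : Nat) (a b lm0 : Int) (arr : List Int)
    (ha : a = (s : Int)) (hb : b = (s : Int) + (c : Int)) (hlm0 : lm0 = m0 (array.take (s - 1)))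
    (hs : 1 ≤ s) (hlen : s + c ≤ array.length) :
    (PySem.List.pyRange a b 1).foldl
      (fun (st : Int × List Int) index =>
        let left_max := if PySem.List.pyGetD array (index - 1) 0 > st.1 then PySem.List.pyGetD array (index - 1) 0 else st.1
        (left_max, PySem.List.pySetD st.2 index left_max)) (lm0, arr)
    = (m0 (array.take (s - 1 + c)), updL array c s arr) := by
  subst ha hb hlm0
  exact fold1_rec array c s arr hs hlen

theorem fold2_gen (array : List Int) (t : Nat) (a rm0 : Int) (arr : List Int)
    (ha : a = (t : Int) - 1) (hrm0 : rm0 = m0 (array.drop (t + 1)))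
    (hlen : t < array.length) :
    (PySem.List.pyRange a (-1) (-1)).foldl
      (fun (st : Int × List Int) index =>
        let right_max := if PySem.List.pyGetD array (index + 1) 0 > st.1 then PySem.List.pyGetD array (index + 1) 0 else st.1
        (right_max, PySem.List.pySetD st.2 index right_max)) (rm0, arr)
    = (m0 (array.drop 1), updR array t arr) := by
  subst ha hrm0
  exact fold2_rec array t arr hlen

theorem A_main (array : List Int) (h : array ≠ []) :
    star_super_star_py array (array.length : Int) = aLoop array 0 (-1) [] := by
  have hn : 1 ≤ array.length := List.length_pos_of_ne_nil h
  have hlen0 : ((PySem.List.pyRange 0 (array.length : Int) 1).map (fun _ => (0 : Int))).length = array.length := by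
    simp [PySem.List.length_pyRange_one]
  simp only [star_super_star_py]
  rw [fold1_gen array (array.length - 1) 1 1 ((array.length : Int)) 0 _
        (by norm_num) (by omega) (by simp [m0]) le_rfl (by omega)]
  rw [fold2_gen array (array.length - 1) ((array.length : Int) - 2) 0 _
        (by omega) (by rw [show array.length - 1 + 1 = array.length from by omega]; simp [m0])
        (by omega)]
  dsimp only
  have hl : ∀ i : Nat, i < array.length →
      PySem.List.pyGetD (updL array (array.length - 1) 1 ((PySem.List.pyRange 0 (array.length : Int) 1).map (fun _ => (0 : Int)))) (i : Int) 0 = m0 (array.take i) := by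
    intro i hi
    rw [updL_getD array (array.length - 1) 1 _ i (by rw [hlen0]; omega) (by rw [hlen0]; omega)]
    by_cases h1 : 1 ≤ i ∧ i < 1 + (array.length - 1)
    · rw [if_pos h1]
    · have hi0 : i = 0 := by omega
      subst hi0
      rw [if_neg h1]
      rw [PySem.List.pyGetD_map_pyRange (fun _ => (0 : Int)) array.length 0 0 (by omega)]
      simp [m0]
  have hr : ∀ i : Nat, i < array.length →
      PySem.List.pyGetD (updR array (array.length - 1) ((PySem.List.pyRange 0 (array.length : Int) 1).map (fun _ => (0 : Int)))) (i : Int) 0 = m0 (array.drop (i + 1)) := by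
    intro i hi
    rw [updR_getD array (array.length - 1) _ i (by rw [hlen0]; omega) (by rw [hlen0]; omega)]
    by_cases h1 : i < array.length - 1
    · rw [if_pos h1]
    · have hi0 : i = array.length - 1 := by omega
      rw [if_neg h1]
      rw [PySem.List.pyGetD_map_pyRange (fun _ => (0 : Int)) array.length i 0 (by omega)]
      rw [show i + 1 = array.length from by omega]
      simp [m0]
  rw [fold3_gen array _ _ hl hr array [] 0 (-1) [] (by simp) (by simp)]
  rw [m0_nil]

theorem B_main (array : List Int) :
    star_super_star_py_alt array (array.length : Int) =
      ((match starOf array with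
        | [] => (-1 : Int)
        | s0 :: _ => if array.count s0 = 1 then s0 else -1), starOf array) := by
  simp only [star_super_star_py_alt]
  rw [PySem.List.pyRepeat_singleton]
  rw [foldS_gen array array.length ((array.length : Int) - 1) 0
        (List.replicate ((array.length : Int)).toNat false) rfl (by simp [m0]) le_rfl]
  dsimp only
  have hlenIS : (List.replicate ((array.length : Int)).toNat false).length = array.length := by
    simp
  have hf : ∀ i : Nat, i < array.length →
      PySem.List.pyGetD
          (updS array array.length (List.replicate ((array.length : Int)).toNat false))
          (i : Int) false =
        if m0 (array.drop (i + 1)) < PySem.List.pyGetD array (i : Int) 0 then true else false := by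
    intro i hi
    rw [updS_getD array array.length _ i (by rw [hlenIS]; omega) (by rw [hlenIS])]
    have h0 : PySem.List.pyGetD (List.replicate ((array.length : Int)).toNat false) (i : Int) false
        = false := by
      rw [PySem.List.pyGetD_natCast]
      exact getD_replicate_false _ _
    rw [h0]
    by_cases hc : m0 (array.drop (i + 1)) < PySem.List.pyGetD array (i : Int) 0
    · rw [if_pos ⟨hi, hc⟩, if_pos hc]
    · rw [if_neg (fun hx => hc hx.2), if_neg hc]
  rw [filterS array _ hf array [] 0 (by simp) (by simp)]
  rcases hso : starOf array with _ | ⟨s0, t⟩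
  · simp
  · by_cases hc : array.count s0 = 1 <;> simp [hc]

theorem empty_case (length : Int) (h : length ≤ 0) :
    star_super_star_py [] length = (-1, []) ∧ star_super_star_py_alt [] length = (-1, []) := by
  constructor
  · simp only [star_super_star_py]
    rw [PySem.List.pyRange_one_eq_nil (by omega), PySem.List.pyRange_neg_one_eq_nil (by omega)]
    simp [PySem.List.enumerate_nil]
  · simp only [star_super_star_py_alt]
    rw [PySem.List.pyRange_neg_one_eq_nil (by omega)]
    simp [PySem.List.enumerate_nil]

-- ===== VERDICT (by name: the statement is the Claim_ definition above) =====
theorem star_super_star_py_spec : Claim_equal_star_super_star_py := by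
  intro array length _ hpre
  unfold Spec_star_super_star_py
  by_cases harr : array = []
  · subst harr
    have hlen : length ≤ 0 := by
      rcases hpre with h | ⟨_, h⟩
      · simp at h; omega
      · exact h
    obtain ⟨hA, hB⟩ := empty_case length hlen
    rw [hA, hB]
  · have hlen : length = (array.length : Int) := by
      rcases hpre with h | ⟨h, _⟩
      · exact h
      · exact absurd h harr
    subst hlen
    rw [A_main array harr, B_main array]
    have h1 := aLoop_sup array 0 (-1) [] le_rfl
    have h2 := aLoop_star array 0 (-1) []
    have hA : aLoop array 0 (-1) [] = ((aLoop array 0 (-1) []).1, (aLoop array 0 (-1) []).2) := rfl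
    rw [hA, h1, h2]
    simp only [List.nil_append]
    rcases starOf_shape array with ⟨h0, he⟩ | ⟨h0, t, ht⟩
    · rw [he, h0]
      norm_num
    · rw [ht]
      by_cases hc : array.count (m0 array) = 1
      · simp [hc, h0]
      · simp [hc]
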